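-- pv_equiv track=rewrite | github.com/im-jonathan/hackerRankProblemSolving | strings/superReducedString.py | superReducedString
-- ===== SOURCE A (Python) =====
-- def superReducedString(s: str) -> str:
--     # Write your code here
--     letters = list(s)
--     i = 0
--     while i < len(letters) - 1:
--         if letters[i] == letters[i+1]:
--             del letters[i+1]
--             del letters[i]
--             i = 0
--             if len(letters) == 0:
--                 return 'Empty String'
--         else:
--             i += 1
--     return ''.join(letters)
-- ===== SOURCE B (Python) =====
-- def superReducedString(s: str) -> str:
--     stack = []
--     for c in s:
--         if stack and stack[-1] == c:
--             stack.pop()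
--         else:
--             stack.append(c)
--     return ''.join(stack) if stack else 'Empty String'
-- ===== Notes on version B (the rewrite author's own statement) =====
-- stated objective: faster
-- what changed: Replaced the restart-from-zero delete-and-rescan loop with a single-pass stack that pops when the top equals the current character.
-- intended difference: On the empty input string A returns '' while B returns 'Empty String'; the problem statement requires 'Empty String' whenever the reduced result is empty, so B's value is the intended one. — e.g. on superReducedString(""): A returns "", B returns "Empty String"
import Mathlib
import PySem

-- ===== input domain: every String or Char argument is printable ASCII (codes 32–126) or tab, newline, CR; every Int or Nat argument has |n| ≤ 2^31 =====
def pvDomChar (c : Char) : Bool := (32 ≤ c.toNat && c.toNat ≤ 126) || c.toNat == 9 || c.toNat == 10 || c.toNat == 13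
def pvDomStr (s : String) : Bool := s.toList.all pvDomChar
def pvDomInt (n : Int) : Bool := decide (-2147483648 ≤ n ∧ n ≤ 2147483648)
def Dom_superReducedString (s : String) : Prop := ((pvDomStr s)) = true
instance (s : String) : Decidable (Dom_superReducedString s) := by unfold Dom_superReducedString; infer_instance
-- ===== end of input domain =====

-- B replaces A's restart-from-zero delete-and-rescan loop by a single-pass stack (asymptotically faster);
-- on the empty input A returns "" while B returns "Empty String" (the intended value), stated as D_ below.

-- ===== PORT A =====
-- A's while loop: i scans; on an adjacent equal pair delete both, reset i to 0,
-- return "Empty String" if the list became empty; else i += 1.  End: ''.join(letters).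
def superReducedStringLoop (letters : List Char) (i : Nat) : String :=
  if h : i + 1 < letters.length then
    if letters[i] = letters[i + 1] then
      if ((letters.eraseIdx (i + 1)).eraseIdx i).length = 0 then "Empty String"
      else superReducedStringLoop ((letters.eraseIdx (i + 1)).eraseIdx i) 0
    else superReducedStringLoop letters (i + 1)
  else String.ofList letters
termination_by (letters.length, letters.length - i)
decreasing_by
  · left
    have : ((letters.eraseIdx (i + 1)).eraseIdx i).length = letters.length - 2 := by
      rw [List.length_eraseIdx, List.length_eraseIdx]
      split_ifs <;> omega
    omega
  · right; omega

def superReducedString (s : String) : String :=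
  superReducedStringLoop s.toList 0

-- ===== PORT B =====
-- B's stack: pop when the top equals the current char, else push.  The Python list grows at the
-- end; here the stack head is the top, so Python's ''.join(stack) is String.ofList stack.reverse.
def srsStep (stack : List Char) (c : Char) : List Char :=
  match stack with
  | t :: rest => if t = c then rest else c :: t :: rest
  | [] => [c]

def superReducedString_alt (s : String) : String :=
  let stack := s.toList.foldl srsStep []
  if stack.isEmpty then "Empty String" else String.ofList stack.reverse

-- ===== PRECONDITION & SPEC =====
-- On the empty input string A returns "" while B returns "Empty String"; the problem statement
-- requires "Empty String" whenever the reduced result is empty, so B's value is the intended one.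
def D_superReducedString (s : String) : Prop := s = ""
instance (s : String) : Decidable (D_superReducedString s) := by unfold D_superReducedString; infer_instance
def Spec_superReducedString (s : String) (out : String) : Prop := ¬ D_superReducedString s → out = superReducedString_alt s
instance (s : String) (out : String) : Decidable (Spec_superReducedString s out) := by unfold Spec_superReducedString; infer_instance
def pvDiffWitness_superReducedString : String := ""
def pvDiffWitnessOut_superReducedString : String × String := ("", "Empty String")

-- ===== CLAIM (what is proved, stated in full; the proofs are below) =====
def Claim_unchanged_superReducedString : Prop := ∀ (s : String), Dom_superReducedString s → Spec_superReducedString s (superReducedString s)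
def Claim_changed_superReducedString : Prop := Dom_superReducedString (pvDiffWitness_superReducedString) ∧ D_superReducedString (pvDiffWitness_superReducedString) ∧ superReducedString (pvDiffWitness_superReducedString) = pvDiffWitnessOut_superReducedString.1 ∧ superReducedString_alt (pvDiffWitness_superReducedString) = pvDiffWitnessOut_superReducedString.2 ∧ pvDiffWitnessOut_superReducedString.1 ≠ pvDiffWitnessOut_superReducedString.2
def Claim_exact_superReducedString : Prop := ∀ (s : String), Dom_superReducedString s → D_superReducedString s → superReducedString s ≠ superReducedString_alt s

-- ===== LEMMAS AND PROOFS =====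

-- The stack stays adjacent-distinct.
theorem srsStep_chain (acc : List Char) (c : Char) (h : List.IsChain (· ≠ ·) acc) :
    List.IsChain (· ≠ ·) (srsStep acc c) := by
  match acc with
  | [] => simp [srsStep]
  | [t] =>
    by_cases htc : t = c <;> simp [srsStep, htc]
    exact fun hh => htc hh.symm
  | t :: u :: rest =>
    rw [List.isChain_cons_cons] at h
    by_cases htc : t = c
    · simpa [srsStep, htc] using h.2
    · rw [srsStep]
      simp only [if_neg htc, List.isChain_cons_cons]
      exact ⟨fun hh => htc hh.symm, h.1, h.2⟩

theorem foldl_srsStep_chain (l acc : List Char) (h : List.IsChain (· ≠ ·) acc) :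
    List.IsChain (· ≠ ·) (l.foldl srsStep acc) := by
  induction l generalizing acc with
  | nil => exact h
  | cons c t ih => exact ih _ (srsStep_chain acc c h)

-- Pushing the same char twice onto a reduced stack is the identity.
theorem srsStep_cancel (acc : List Char) (a : Char) (h : List.IsChain (· ≠ ·) acc) :
    srsStep (srsStep acc a) a = acc := by
  match acc with
  | [] => simp [srsStep]
  | [b] =>
    by_cases hba : b = a <;> simp [srsStep, hba]
  | b :: c :: rest =>
    by_cases hba : b = a
    · subst hba
      have hbc : b ≠ c := (List.isChain_cons_cons.mp h).1
      simp [srsStep, Ne.symm hbc]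
    · simp [srsStep, hba]

-- Deleting an adjacent equal pair does not change the fold.
theorem foldl_srsStep_cancel (u v acc : List Char) (a : Char) (h : List.IsChain (· ≠ ·) acc) :
    (u ++ a :: a :: v).foldl srsStep acc = (u ++ v).foldl srsStep acc := by
  simp only [List.foldl_append, List.foldl_cons]
  rw [srsStep_cancel _ a (foldl_srsStep_chain u acc h)]

-- A reduced list folds to its own reverse.
theorem foldl_srsStep_reduced (l acc : List Char)
    (h : List.IsChain (· ≠ ·) (acc.reverse ++ l)) :
    l.foldl srsStep acc = l.reverse ++ acc := by
  induction l generalizing acc with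
  | nil => simp
  | cons c t ih =>
    match acc with
    | [] =>
      have := ih [c] (by simpa using h)
      simpa [srsStep] using this
    | b :: rest =>
      have hbc : b ≠ c := by
        have h' : List.IsChain (· ≠ ·) ((rest.reverse ++ [b]) ++ c :: t) := by
          simpa using h
        have := (List.isChain_append.mp h').2.2
        exact this b (by simp) c (by simp)
      have := ih (c :: b :: rest) (by simpa using h)
      simp only [List.foldl_cons, srsStep, if_neg hbc]
      simpa using this

-- Removing indices i+1 then i = take i ++ drop (i+2).
theorem eraseIdx_pair (l : List Char) (i : Nat) :
    (l.eraseIdx (i + 1)).eraseIdx i = l.take i ++ l.drop (i + 2) := by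
  induction i generalizing l with
  | zero =>
    match l with
    | [] => rfl
    | [a] => rfl
    | a :: b :: t => simp [List.eraseIdx]
  | succ i ih =>
    match l with
    | [] => rfl
    | a :: t =>
      simp only [List.eraseIdx_cons_succ, List.take_succ_cons, List.drop_succ_cons,
        List.cons_append, List.cons.injEq, true_and]
      exact ih t

theorem decomp_pair (l : List Char) (i : Nat) (h : i + 1 < l.length) :
    l = l.take i ++ l[i] :: l[i+1] :: l.drop (i + 2) := by
  have h0 : i < l.length := by omega
  conv_lhs => rw [← List.take_append_drop i l]
  rw [List.drop_eq_getElem_cons h0, List.drop_eq_getElem_cons h]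

-- Core: A's loop computes the stack reduction, given the scanned prefix is adjacent-distinct.
theorem loop_eq_fold (letters : List Char) (i : Nat)
    (hch : List.IsChain (· ≠ ·) (letters.take (i + 1))) (hne : letters ≠ []) :
    superReducedStringLoop letters i =
      (if (letters.foldl srsStep []).isEmpty then "Empty String"
       else String.ofList (letters.foldl srsStep []).reverse) := by
  induction letters, i using superReducedStringLoop.induct with
  | case1 letters i h heq hlen =>
    rw [superReducedStringLoop]
    rw [dif_pos h, if_pos heq, if_pos hlen]
    have hl' : (letters.eraseIdx (i + 1)).eraseIdx i = letters.take i ++ letters.drop (i + 2) :=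
      eraseIdx_pair letters i
    have hfold : letters.foldl srsStep [] = ((letters.eraseIdx (i + 1)).eraseIdx i).foldl srsStep [] := by
      conv_lhs => rw [decomp_pair letters i h, heq]
      rw [foldl_srsStep_cancel _ _ _ _ (by simp), ← hl']
    have hnil : (letters.eraseIdx (i + 1)).eraseIdx i = [] := List.length_eq_zero_iff.mp hlen
    rw [hfold, hnil]
    simp
  | case2 letters i h heq hlen ih =>
    rw [superReducedStringLoop]
    rw [dif_pos h, if_pos heq, if_neg hlen]
    have hl' : (letters.eraseIdx (i + 1)).eraseIdx i = letters.take i ++ letters.drop (i + 2) :=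
      eraseIdx_pair letters i
    have hfold : letters.foldl srsStep [] = ((letters.eraseIdx (i + 1)).eraseIdx i).foldl srsStep [] := by
      conv_lhs => rw [decomp_pair letters i h, heq]
      rw [foldl_srsStep_cancel _ _ _ _ (by simp), ← hl']
    rw [hfold]
    have hl'ne : (letters.eraseIdx (i + 1)).eraseIdx i ≠ [] := by
      intro hc; exact hlen (by simp [hc])
    refine ih ?_ hl'ne
    match (letters.eraseIdx (i + 1)).eraseIdx i, hl'ne with
    | c :: t, _ => simp [List.take]
  | case3 letters i h heq ih =>
    rw [superReducedStringLoop]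
    rw [dif_pos h, if_neg heq]
    refine ih ?_ hne
    rw [List.take_add_one, List.getElem?_eq_getElem h]
    simp only [Option.toList_some]
    have htake : letters.take (i + 1) = letters.take i ++ [letters[i]] := by
      rw [List.take_add_one, List.getElem?_eq_getElem (by omega : i < letters.length)]; rfl
    rw [List.isChain_append]
    refine ⟨hch, by simp, ?_⟩
    intro x hx y hy
    simp only [List.head?_cons, Option.mem_def, Option.some.injEq] at hy
    subst hy
    rw [htake, List.getLast?_append] at hx
    simp only [List.getLast?_singleton, Option.some_or, Option.mem_some_iff] at hx
    rw [← hx]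
    exact heq
  | case4 letters i h =>
    rw [superReducedStringLoop]
    rw [dif_neg h]
    have hred : List.IsChain (· ≠ ·) letters := by
      have : letters.take (i + 1) = letters := List.take_of_length_le (by omega)
      rwa [this] at hch
    have hf : letters.foldl srsStep [] = letters.reverse := by
      simpa using foldl_srsStep_reduced letters [] (by simpa using hred)
    rw [hf]
    rw [if_neg (by simpa using hne)]
    simp

-- ===== VERDICT (by name: the statement is the Claim_ definition above) =====
theorem superReducedString_spec : Claim_unchanged_superReducedString := by
  intro s _ hD
  have hne : s.toList ≠ [] := by
    intro hc
    exact hD (by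
      unfold D_superReducedString
      have := congrArg String.ofList hc
      simpa using this)
  unfold superReducedString superReducedString_alt
  have hch : List.IsChain (· ≠ ·) (s.toList.take (0 + 1)) := by
    match s.toList, hne with
    | c :: t, _ => simp
  simpa using loop_eq_fold s.toList 0 hch hne

theorem superReducedString_changed : Claim_changed_superReducedString := by
  unfold Claim_changed_superReducedString
  refine ⟨by simp [Dom_superReducedString, pvDomStr, pvDiffWitness_superReducedString], rfl, ?_, ?_, by simp [pvDiffWitnessOut_superReducedString]⟩
  · rw [superReducedString]
    rw [pvDiffWitness_superReducedString, show ("" : String).toList = [] from by simp]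
    rw [superReducedStringLoop]
    simp [pvDiffWitnessOut_superReducedString]
  · rw [superReducedString_alt]
    rw [pvDiffWitness_superReducedString, show ("" : String).toList = [] from by simp]
    simp [pvDiffWitnessOut_superReducedString]

theorem superReducedString_tight : Claim_exact_superReducedString := by
  intro s _ hD
  unfold D_superReducedString at hD
  subst hD
  rw [superReducedString, superReducedString_alt]
  rw [show ("" : String).toList = [] from by simp]
  rw [superReducedStringLoop]
  simp
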